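-- pv_equiv track=rewrite | github.com/JuanSolis07/Analisis-de-algoritmos | Avance 2 Proyecto Final/src/Busqueda_contrasenas_DV.py | build_huffman_costs_from_freqs
-- ===== SOURCE A (Python) =====
-- import heapq
--
-- def build_huffman_costs_from_freqs(freqs):
--     """
--     Dado un dict char->freq construye longitudes tipo Huffman (enteros)
--     retornando char->length. Implementación que mantiene conjuntos en nodos.
--     """
--     # fallback
--     if not freqs:
--         return {}
--     heap = [(f, {ch}) for ch, f in freqs.items()]
--     heapq.heapify(heap)
--     lengths = {ch: 0 for ch in freqs}
--     if len(heap) == 1: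
--         ch = next(iter(freqs))
--         lengths[ch] = 1
--         return lengths
--     while len(heap) > 1:
--         f1, s1 = heapq.heappop(heap)
--         f2, s2 = heapq.heappop(heap)
--         for ch in s1:
--             lengths[ch] += 1
--         for ch in s2:
--             lengths[ch] += 1
--         heapq.heappush(heap, (f1 + f2, s1.union(s2)))
--     return lengths
-- ===== SOURCE B (Python) =====
-- import heapq
--
--
-- class _Tree:
--     """Huffman tree: a leaf carries a symbol, an internal node its two children.
--     Heap order is by frequency alone."""
--     __slots__ = ("freq", "ch", "left", "right")
--
--     def __init__(self, freq, ch=None, left=None, right=None):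
--         self.freq = freq
--         self.ch = ch
--         self.left = left
--         self.right = right
--
--     def __lt__(self, other):
--         return self.freq < other.freq
--
--
-- def build_huffman_costs_from_freqs(freqs):
--     """
--     Dado un dict char->freq construye longitudes tipo Huffman (enteros)
--     retornando char->length. Builds the Huffman tree with a heap of tree
--     nodes ordered by frequency, then reads each length off as its leaf's depth.
--     """
--     if not freqs:
--         return {}
--     if len(freqs) == 1:
--         # a lone symbol still needs one bit
--         return {ch: 1 for ch in freqs}
--     heap = [_Tree(f, ch=ch) for ch, f in freqs.items()]
--     heapq.heapify(heap)
--     while len(heap) > 1: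
--         a = heapq.heappop(heap)
--         b = heapq.heappop(heap)
--         heapq.heappush(heap, _Tree(a.freq + b.freq, left=a, right=b))
--     depths = {}
--     stack = [(heap[0], 0)]
--     while stack:
--         t, d = stack.pop()
--         if t.ch is not None:
--             depths[t.ch] = d
--         else:
--             stack.append((t.left, d + 1))
--             stack.append((t.right, d + 1))
--     return {ch: depths[ch] for ch in freqs}
-- ===== Notes on version B (the rewrite author's own statement) =====
-- stated objective: faster
-- what changed: B keeps a heap of Huffman tree nodes ordered by frequency alone and derives each symbol's length as its leaf's depth via an explicit-stack DFS, instead of A's heap of (freq, char-set) pairs that builds the union of both popped sets and increments every member on each merge.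
import Mathlib
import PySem

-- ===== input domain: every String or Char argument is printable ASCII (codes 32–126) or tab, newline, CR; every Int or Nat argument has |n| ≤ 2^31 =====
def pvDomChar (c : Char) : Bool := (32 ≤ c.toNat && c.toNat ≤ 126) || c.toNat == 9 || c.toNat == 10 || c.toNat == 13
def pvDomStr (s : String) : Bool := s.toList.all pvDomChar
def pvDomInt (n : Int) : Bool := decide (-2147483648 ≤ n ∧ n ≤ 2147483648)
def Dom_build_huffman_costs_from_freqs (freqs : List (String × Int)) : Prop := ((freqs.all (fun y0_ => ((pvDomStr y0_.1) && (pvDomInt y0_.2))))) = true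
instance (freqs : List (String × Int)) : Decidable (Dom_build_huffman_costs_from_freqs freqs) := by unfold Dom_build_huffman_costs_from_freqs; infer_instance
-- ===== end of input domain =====

-- B builds an explicit Huffman tree with a heap of tree nodes ordered by frequency alone
-- and reads each symbol's length off as its leaf's depth (objective: faster, measured by the
-- timing run; A unions and walks the char-sets of both popped entries on every merge).

-- ===== PORT A =====
-- `<` on A's heap tuples (freq, set): first unequal slot decides; on sets Python's `<` is proper subset.
def hufLt (x y : Int × PySem.Set String) : Bool :=
  decide (x.1 < y.1) ||
    (x.1 == y.1 && (PySem.Set.issubset x.2 y.2 && !(PySem.Set.equal x.2 y.2)))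

-- A-side helpers: transliteration of CPython's heapq (_siftdown / _siftup / heapify /
-- heappush / heappop), generic in the element type and its `<`.
-- `d` is a default for in-range list reads (all reads are in range when called as heapq does).
def hpSiftdownLoop {α : Type} (lt : α → α → Bool) (d : α) (newitem : α) :
    Nat → List α → Nat → Nat → (List α × Nat)
  | 0, heap, _, pos => (heap, pos)
  | fuel + 1, heap, startpos, pos =>
    if startpos < pos then
      let parentpos := (pos - 1) / 2
      let parent := heap.getD parentpos d
      if lt newitem parent then
        hpSiftdownLoop lt d newitem fuel (heap.set pos parent) startpos parentpos
      else (heap, pos)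
    else (heap, pos)

def hpSiftdown {α : Type} (lt : α → α → Bool) (d : α) (heap : List α)
    (startpos pos : Nat) : List α :=
  (hpSiftdownLoop lt d (heap.getD pos d) pos heap startpos pos).1.set
    (hpSiftdownLoop lt d (heap.getD pos d) pos heap startpos pos).2 (heap.getD pos d)

def hpSiftupLoop {α : Type} (lt : α → α → Bool) (d : α) (endpos : Nat) :
    Nat → List α → Nat → Nat → (List α × Nat)
  | 0, heap, pos, _ => (heap, pos)
  | fuel + 1, heap, pos, childpos =>
    if childpos < endpos then
      let rightpos := childpos + 1
      let childpos :=
        if rightpos < endpos && !(lt (heap.getD childpos d) (heap.getD rightpos d)) then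
          rightpos
        else childpos
      let heap := heap.set pos (heap.getD childpos d)
      hpSiftupLoop lt d endpos fuel heap childpos (2 * childpos + 1)
    else (heap, pos)

def hpSiftup {α : Type} (lt : α → α → Bool) (d : α) (heap : List α) (pos : Nat) : List α :=
  hpSiftdown lt d
    ((hpSiftupLoop lt d heap.length heap.length heap pos (2 * pos + 1)).1.set
      (hpSiftupLoop lt d heap.length heap.length heap pos (2 * pos + 1)).2 (heap.getD pos d))
    pos
    (hpSiftupLoop lt d heap.length heap.length heap pos (2 * pos + 1)).2

def hpHeapify {α : Type} (lt : α → α → Bool) (d : α) (heap : List α) : List α :=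
  ((List.range (heap.length / 2)).reverse).foldl (fun h i => hpSiftup lt d h i) heap

def hpPush {α : Type} (lt : α → α → Bool) (d : α) (heap : List α) (item : α) : List α :=
  hpSiftdown lt d (heap ++ [item]) 0 heap.length

-- heappop on a nonempty heap (A only pops nonempty heaps; [] is Python's IndexError)
def hpPop {α : Type} (lt : α → α → Bool) (d : α) (heap : List α) : α × List α :=
  if heap.isEmpty then (d, [])
  else if heap.dropLast.isEmpty then (heap.getD (heap.length - 1) d, [])
  else (heap.dropLast.getD 0 d,
    hpSiftup lt d (heap.dropLast.set 0 (heap.getD (heap.length - 1) d)) 0)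

-- the dict the Python caller passes (assoc list → Python dict: later value wins, key keeps its place)
def hufDict (freqs : List (String × Int)) : PySem.Dict String Int :=
  freqs.foldl (fun d kv => d.insert kv.1 kv.2) PySem.Dict.empty

def hufDfltA : Int × PySem.Set String := (0, PySem.Set.empty)

-- for ch in s: lengths[ch] += 1   (every ch is already a key; +1s are order-insensitive)
def hufInc (s : List String) (lengths : PySem.Dict String Int) : PySem.Dict String Int :=
  s.foldl (fun L ch => L.modify ch 0 (· + 1)) lengths

-- while len(heap) > 1: … (fuel = initial heap length; each iteration shrinks the heap by one)
def hufLoopA : Nat → List (Int × PySem.Set String) → PySem.Dict String Int →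
    PySem.Dict String Int
  | 0, _, lengths => lengths
  | fuel + 1, heap, lengths =>
    if 1 < heap.length then
      let p1 := hpPop hufLt hufDfltA heap
      let p2 := hpPop hufLt hufDfltA p1.2
      let lengths := hufInc p2.1.2 (hufInc p1.1.2 lengths)
      hufLoopA fuel
        (hpPush hufLt hufDfltA p2.2 (p1.1.1 + p2.1.1, PySem.Set.union p1.1.2 p2.1.2))
        lengths
    else lengths

def build_huffman_costs_from_freqs (freqs : List (String × Int)) : List (String × Int) :=
  let d := hufDict freqs
  if d.items.isEmpty then [] else
  let heap := hpHeapify hufLt hufDfltA (d.items.map (fun kv => (kv.2, PySem.Set.ofList [kv.1])))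
  let lengths := d.keys.foldl (fun L ch => L.insert ch (0 : Int)) PySem.Dict.empty
  if heap.length == 1 then
    -- ch = next(iter(freqs)): the first key (the dict is nonempty here)
    (lengths.insert (d.keys.headD "") 1).items
  else
    (hufLoopA heap.length heap lengths).items

-- ===== PORT B =====
-- Source B's _Tree objects: a leaf carries a symbol, an internal node its two children;
-- every node carries its frequency, and `<` (btLt) compares frequencies alone.
inductive BTree where
  | leaf : Int → String → BTree
  | node : Int → BTree → BTree → BTree
deriving DecidableEq, Repr

def btFreq : BTree → Int
  | BTree.leaf f _ => f
  | BTree.node f _ _ => f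

def btLt (x y : BTree) : Bool := decide (btFreq x < btFreq y)

def bhDflt : BTree := BTree.leaf 0 ""

-- CPython heapq ported by hand over Array (exact transliteration of _siftdown/_siftup/
-- heapify/heappush/heappop at the array level; heapq is a stdlib call in Source B).
def bhSdLoop (x : BTree) : Nat → Array BTree → Nat → Nat → Array BTree
  | 0, a, _, pos => a.setIfInBounds pos x
  | fuel + 1, a, start, pos =>
    if start < pos then
      let pp := (pos - 1) / 2
      let par := a.getD pp bhDflt
      if btLt x par then bhSdLoop x fuel (a.setIfInBounds pos par) start pp
      else a.setIfInBounds pos x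
    else a.setIfInBounds pos x

def bhSiftdown (a : Array BTree) (start pos : Nat) : Array BTree :=
  bhSdLoop (a.getD pos bhDflt) pos a start pos

def bhSuLoop (start : Nat) (x : BTree) (endpos : Nat) :
    Nat → Array BTree → Nat → Nat → Array BTree
  | 0, a, pos, _ => bhSdLoop x pos a start pos
  | fuel + 1, a, pos, child =>
    if child < endpos then
      let child :=
        if child + 1 < endpos && !(btLt (a.getD child bhDflt) (a.getD (child + 1) bhDflt)) then
          child + 1
        else child
      bhSuLoop start x endpos fuel (a.setIfInBounds pos (a.getD child bhDflt)) child
        (2 * child + 1)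
    else bhSdLoop x pos a start pos

def bhSiftup (a : Array BTree) (pos : Nat) : Array BTree :=
  bhSuLoop pos (a.getD pos bhDflt) a.size a.size a pos (2 * pos + 1)

-- for i in reversed(range(n // 2)): _siftup(heap, i)
def bhHeapAux : Nat → Array BTree → Array BTree
  | 0, a => a
  | k + 1, a => bhHeapAux k (bhSiftup a k)

def bhHeapify (a : Array BTree) : Array BTree := bhHeapAux (a.size / 2) a

def bhPush (a : Array BTree) (x : BTree) : Array BTree :=
  bhSiftdown (a.push x) 0 a.size

-- heappop on a nonempty heap (B only pops nonempty heaps; [] is Python's IndexError)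
def bhPop (a : Array BTree) : BTree × Array BTree :=
  let last := a.getD (a.size - 1) bhDflt
  let rest := a.pop
  if rest.size = 0 then (last, rest)
  else (rest.getD 0 bhDflt, bhSiftup (rest.setIfInBounds 0 last) 0)

-- while len(heap) > 1: pop two trees, push their merged parent
def bhLoop : Nat → Array BTree → Array BTree
  | 0, a => a
  | fuel + 1, a =>
    if 1 < a.size then
      let p1 := bhPop a
      let p2 := bhPop p1.2
      bhLoop fuel (bhPush p2.2 (BTree.node (btFreq p1.1 + btFreq p2.1) p1.1 p2.1))
    else a

def btSize : BTree → Nat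
  | BTree.leaf _ _ => 1
  | BTree.node _ l r => 1 + btSize l + btSize r

-- Source B's explicit-stack DFS recording each leaf's depth
def bhWalk : List (BTree × Int) → PySem.Dict String Int → PySem.Dict String Int
  | [], depths => depths
  | (BTree.leaf _ ch, d) :: rest, depths => bhWalk rest (depths.insert ch d)
  | (BTree.node _ l r, d) :: rest, depths => bhWalk ((r, d + 1) :: (l, d + 1) :: rest) depths
  termination_by stack _ => (stack.map (fun p => btSize p.1)).sum
  decreasing_by all_goals (simp [btSize]; try omega)

def build_huffman_costs_from_freqs_alt (freqs : List (String × Int)) : List (String × Int) :=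
  let d := hufDict freqs
  if d.items.isEmpty then [] else
  -- a lone symbol still needs one bit
  if d.items.length == 1 then
    (d.keys.foldl (fun L ch => L.insert ch (1 : Int)) PySem.Dict.empty).items
  else
  let heap := bhHeapify ⟨d.items.map (fun kv => BTree.leaf kv.2 kv.1)⟩
  let fin := bhLoop heap.size heap
  -- heap[0]: the loop ends with exactly one tree in the heap
  let depths := bhWalk [(fin.getD 0 bhDflt, 0)] PySem.Dict.empty
  -- depths[ch]: every key is a leaf of the final tree, so the lookup never misses
  (d.keys.foldl (fun L ch => L.insert ch (depths.getD ch 0)) PySem.Dict.empty).items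

-- ===== PRECONDITION & SPEC =====
def Spec_build_huffman_costs_from_freqs (freqs : List (String × Int)) (out : List (String × Int)) : Prop := out = build_huffman_costs_from_freqs_alt freqs
instance (freqs : List (String × Int)) (out : List (String × Int)) : Decidable (Spec_build_huffman_costs_from_freqs freqs out) := by unfold Spec_build_huffman_costs_from_freqs; infer_instance

-- ===== CLAIM (what is proved, stated in full; the proofs are below) =====
def Claim_equal_build_huffman_costs_from_freqs : Prop := ∀ (freqs : List (String × Int)), Dom_build_huffman_costs_from_freqs freqs → Spec_build_huffman_costs_from_freqs freqs (build_huffman_costs_from_freqs freqs)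

-- ===== LEMMAS AND PROOFS =====

-- ---- generic facts about list reads/writes ----

theorem pvGetD_map {α β : Type} (π : α → β) (l : List α) (d : α) (n : Nat) :
    (l.map π).getD n (π d) = π (l.getD n d) := by
  rcases Nat.lt_or_ge n l.length with h | h
  · rw [List.getD_eq_getElem _ _ (by simpa using h), List.getD_eq_getElem _ _ h]
    simp
  · rw [List.getD_eq_default _ _ (by simpa using h), List.getD_eq_default _ _ h]

theorem pvGetD_set_ne {α : Type} (l : List α) (p q : Nat) (v d : α) (h : q ≠ p) :
    (l.set p v).getD q d = l.getD q d := by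
  rcases Nat.lt_or_ge q l.length with hq | hq
  · rw [List.getD_eq_getElem _ _ (by simpa using hq), List.getD_eq_getElem _ _ hq,
      List.getElem_set]
    rw [if_neg (by omega)]
  · rw [List.getD_eq_default _ _ (by simpa using hq), List.getD_eq_default _ _ hq]

theorem pvSet_getD_self {α : Type} (l : List α) (p : Nat) (d : α) (h : p < l.length) :
    l.set p (l.getD p d) = l := by
  rw [List.getD_eq_getElem _ _ h]; exact List.set_getElem_self h

theorem pvMem_set {α : Type} {a v : α} :
    ∀ {l : List α} {i : Nat}, a ∈ l.set i v → a = v ∨ a ∈ l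
  | [], i, h => by simp at h
  | x :: t, 0, h => by
    rcases List.mem_cons.mp h with h | h
    · exact Or.inl h
    · exact Or.inr (List.mem_cons_of_mem _ h)
  | x :: t, i + 1, h => by
    rcases List.mem_cons.mp h with h | h
    · exact Or.inr (by simp [h])
    · rcases pvMem_set h with h | h
      · exact Or.inl h
      · exact Or.inr (List.mem_cons_of_mem _ h)

theorem pvConsSet_perm {α : Type} (d b : α) :
    ∀ (l : List α) (q : Nat), q < l.length → List.Perm (l.getD q d :: l.set q b) (b :: l)
  | x :: t, 0, _ => by simpa using List.Perm.swap b x t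
  | x :: t, q + 1, h => by
    have ih := pvConsSet_perm d b t q (by simpa using h)
    simp only [List.getD_cons_succ, List.set_cons_succ]
    exact ((List.Perm.swap x (t.getD q d) _).trans (ih.cons x)).trans (List.Perm.swap b x t)

theorem pvSetSet_perm {α : Type} (d b : α) :
    ∀ (l : List α) (p q : Nat), p ≠ q → p < l.length → q < l.length →
      List.Perm ((l.set p (l.getD q d)).set q b) (l.set p b)
  | x :: t, 0, 0, hne, _, _ => absurd rfl hne
  | x :: t, 0, q + 1, _, _, hq => by
    simp only [List.getD_cons_succ, List.set_cons_zero, List.set_cons_succ]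
    exact pvConsSet_perm d b t q (by simpa using hq)
  | x :: t, p + 1, 0, _, hp, _ => by
    simp only [List.getD_cons_zero, List.set_cons_zero, List.set_cons_succ]
    have hp' : p < t.length := by simpa using hp
    have h1 := List.set_perm_cons_eraseIdx hp' x
    have h2 := List.set_perm_cons_eraseIdx hp' b
    exact ((h1.cons b).trans (List.Perm.swap x b _)).trans (h2.cons x).symm
  | x :: t, p + 1, q + 1, hne, hp, hq => by
    simp only [List.getD_cons_succ, List.set_cons_succ]
    exact (pvSetSet_perm d b t p q (by omega) (by simpa using hp) (by simpa using hq)).cons x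

-- ---- Array ↔ List bridges (B's heap lives in an Array) ----

theorem pvASize {α : Type} (l : List α) : (Array.mk l).size = l.length := rfl

theorem pvAGetD {α : Type} (l : List α) (i : Nat) (d : α) :
    (Array.mk l).getD i d = l.getD i d := by
  unfold Array.getD
  split
  · next h => rw [List.getD_eq_getElem _ _ (by simpa using h)]; rfl
  · next h => rw [List.getD_eq_default _ _ (by simpa using h)]

theorem pvASet {α : Type} (l : List α) (i : Nat) (v : α) :
    (Array.mk l).setIfInBounds i v = Array.mk (l.set i v) := by
  unfold Array.setIfInBounds
  split
  · rfl
  · next h => rw [List.set_eq_of_length_le (by simpa using Nat.le_of_not_lt h)]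

theorem pvAPop {α : Type} (l : List α) : (Array.mk l).pop = Array.mk l.dropLast := rfl

theorem pvAPush {α : Type} (l : List α) (x : α) :
    (Array.mk l).push x = Array.mk (l ++ [x]) := by
  apply Array.ext'
  simp

-- ---- the heapq helpers permute the heap ----

theorem pvSdLoop_perm {α : Type} (lt : α → α → Bool) (d x : α) :
    ∀ (fuel : Nat) (l : List α) (s p : Nat), p < l.length →
      (hpSiftdownLoop lt d x fuel l s p).2 < l.length ∧
      (hpSiftdownLoop lt d x fuel l s p).1.length = l.length ∧
      List.Perm ((hpSiftdownLoop lt d x fuel l s p).1.set (hpSiftdownLoop lt d x fuel l s p).2 x)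
        (l.set p x)
  | 0, l, s, p, hp => ⟨hp, rfl, List.Perm.refl _⟩
  | fuel + 1, l, s, p, hp => by
    simp only [hpSiftdownLoop]
    by_cases h : s < p
    · simp only [if_pos h]
      by_cases h2 : lt x (l.getD ((p - 1) / 2) d)
      · simp only [if_pos h2]
        have hpp : (p - 1) / 2 < p := by have := Nat.div_le_self (p - 1) 2; omega
        have hlen : (p - 1) / 2 < (l.set p (l.getD ((p - 1) / 2) d)).length := by
          simp only [List.length_set]; omega
        obtain ⟨a1, a2, a3⟩ := pvSdLoop_perm lt d x fuel _ s _ hlen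
        refine ⟨by simpa using a1, by simpa using a2, a3.trans ?_⟩
        exact pvSetSet_perm d x l p ((p - 1) / 2) (by omega) hp (by omega)
      · simp only [if_neg h2]; exact ⟨hp, by trivial, by trivial⟩
    · simp only [if_neg h]; exact ⟨hp, by trivial, by trivial⟩

theorem pvSiftdown_perm {α : Type} (lt : α → α → Bool) (d : α) (l : List α) (s p : Nat)
    (hp : p < l.length) : List.Perm (hpSiftdown lt d l s p) l := by
  unfold hpSiftdown
  obtain ⟨a1, a2, a3⟩ := pvSdLoop_perm lt d (l.getD p d) p l s p hp
  have e : l.set p (l.getD p d) = l := pvSet_getD_self l p d hp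
  rw [e] at a3
  exact a3

theorem pvSuLoop_perm {α : Type} (lt : α → α → Bool) (d x : α) :
    ∀ (fuel endpos : Nat) (l : List α) (p c : Nat), endpos = l.length → p < l.length → p < c →
      (hpSiftupLoop lt d endpos fuel l p c).2 < l.length ∧
      (hpSiftupLoop lt d endpos fuel l p c).1.length = l.length ∧
      List.Perm ((hpSiftupLoop lt d endpos fuel l p c).1.set (hpSiftupLoop lt d endpos fuel l p c).2 x)
        (l.set p x)
  | 0, endpos, l, p, c, _, hp, _ => ⟨hp, rfl, List.Perm.refl _⟩
  | fuel + 1, endpos, l, p, c, he, hp, hpc => by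
    simp only [hpSiftupLoop]
    by_cases h : c < endpos
    · simp only [if_pos h]
      set c' := if c + 1 < endpos && !(lt (l.getD c d) (l.getD (c + 1) d)) then c + 1 else c with hc'
      have hc'e : c' ≤ c + 1 ∧ c ≤ c' ∧ c' < endpos := by
        rw [hc']; split
        · next hcond => exact ⟨le_refl _, by omega, by
            rcases Bool.and_eq_true_iff.mp hcond with ⟨h1, _⟩; exact of_decide_eq_true h1⟩
        · exact ⟨by omega, le_refl _, h⟩
      have hlen : c' < (l.set p (l.getD c' d)).length := by simp only [List.length_set]; omega
      obtain ⟨a1, a2, a3⟩ := pvSuLoop_perm lt d x fuel endpos _ c' (2 * c' + 1)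
        (by simpa using he) hlen (by omega)
      refine ⟨by simpa using a1, by simpa using a2, a3.trans ?_⟩
      exact pvSetSet_perm d x l p c' (by omega) hp (by omega)
    · simp only [if_neg h]; exact ⟨hp, by trivial, by trivial⟩

theorem pvSiftup_perm {α : Type} (lt : α → α → Bool) (d : α) (l : List α) (p : Nat)
    (hp : p < l.length) : List.Perm (hpSiftup lt d l p) l := by
  unfold hpSiftup
  obtain ⟨a1, a2, a3⟩ := pvSuLoop_perm lt d (l.getD p d) l.length l.length l p (2 * p + 1)
    rfl hp (by omega)
  have e : l.set p (l.getD p d) = l := pvSet_getD_self l p d hp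
  rw [e] at a3
  refine (pvSiftdown_perm lt d _ p _ ?_).trans a3
  simp only [List.length_set, a2]; exact a1

theorem pvHeapifyFold_perm {α : Type} (lt : α → α → Bool) (d : α) :
    ∀ (idxs : List Nat) (l : List α), (∀ i ∈ idxs, i < l.length) →
      List.Perm (idxs.foldl (fun h i => hpSiftup lt d h i) l) l
  | [], l, _ => List.Perm.refl _
  | i :: t, l, h => by
    simp only [List.foldl_cons]
    have h1 : List.Perm (hpSiftup lt d l i) l := pvSiftup_perm lt d l i (h i (by simp))
    refine (pvHeapifyFold_perm lt d t _ ?_).trans h1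
    intro j hj; rw [h1.length_eq]; exact h j (by simp [hj])

theorem pvHeapify_perm {α : Type} (lt : α → α → Bool) (d : α) (l : List α) :
    List.Perm (hpHeapify lt d l) l := by
  unfold hpHeapify
  refine pvHeapifyFold_perm lt d _ l ?_
  intro i hi
  simp only [List.mem_reverse, List.mem_range] at hi
  have := Nat.div_le_self l.length 2
  omega

theorem pvPush_perm {α : Type} (lt : α → α → Bool) (d : α) (l : List α) (x : α) :
    List.Perm (hpPush lt d l x) (x :: l) := by
  unfold hpPush
  exact (pvSiftdown_perm lt d (l ++ [x]) 0 l.length (by simp)).trans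
    (List.perm_append_singleton x l)

theorem pvPop_perm {α : Type} (lt : α → α → Bool) (d : α) (l : List α) (hl : l ≠ []) :
    List.Perm ((hpPop lt d l).1 :: (hpPop lt d l).2) l := by
  unfold hpPop
  rw [if_neg (by simpa [List.isEmpty_iff] using hl)]
  by_cases hr : l.dropLast.isEmpty
  · rw [if_pos hr]
    match l, hl with
    | [a], _ => simp
    | a :: b :: t, _ => simp [List.dropLast] at hr
  · rw [if_neg hr]
    have hrne : l.dropLast ≠ [] := by simpa [List.isEmpty_iff] using hr
    have h0 : 0 < l.dropLast.length := List.length_pos_iff.mpr hrne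
    have hlast : l.getD (l.length - 1) d = l.getLast hl := by
      have hlt : l.length - 1 < l.length := by
        have := List.length_pos_iff.mpr hl; omega
      rw [List.getD_eq_getElem _ _ hlt, List.getLast_eq_getElem]
    have hsp := pvSiftup_perm lt d (l.dropLast.set 0 (l.getD (l.length - 1) d)) 0
      (by simpa using h0)
    refine ((hsp.cons _).trans ?_)
    refine (pvConsSet_perm d _ l.dropLast 0 h0).trans ?_
    rw [hlast]
    exact (List.perm_append_singleton _ _).symm.trans
      (by rw [List.dropLast_append_getLast hl])

-- ---- the ghost heap: (stored freq, char-set, tree), ordered exactly like A's tuples ----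

def hufDfltB : Int × PySem.Set String × BTree := (0, PySem.Set.empty, bhDflt)

def hufLtB (x y : Int × PySem.Set String × BTree) : Bool := hufLt (x.1, x.2.1) (y.1, y.2.1)

def hufLoopB : Nat → List (Int × PySem.Set String × BTree) →
    List (Int × PySem.Set String × BTree)
  | 0, heap => heap
  | fuel + 1, heap =>
    if 1 < heap.length then
      let p1 := hpPop hufLtB hufDfltB heap
      let p2 := hpPop hufLtB hufDfltB p1.2
      hufLoopB fuel
        (hpPush hufLtB hufDfltB p2.2
          (p1.1.1 + p2.1.1, PySem.Set.union p1.1.2.1 p2.1.2.1,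
            BTree.node (p1.1.1 + p2.1.1) p1.1.2.2 p2.1.2.2))
    else heap

def hufProj (e : Int × PySem.Set String × BTree) : Int × PySem.Set String := (e.1, e.2.1)

def hufTr (e : Int × PySem.Set String × BTree) : BTree := e.2.2

def hufLeaves : BTree → List String
  | BTree.leaf _ c => [c]
  | BTree.node _ l r => hufLeaves l ++ hufLeaves r

def hufDepthIn : BTree → String → Int
  | BTree.leaf _ _, _ => 0
  | BTree.node _ l r, c =>
      hufDepthIn l c + hufDepthIn r c +
        (if c ∈ hufLeaves l then 1 else 0) + (if c ∈ hufLeaves r then 1 else 0)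

def hufSumD (h : List (Int × PySem.Set String × BTree)) (c : String) : Int :=
  (h.map fun e => hufDepthIn e.2.2 c).sum

def hufINV (keys : List String) (h : List (Int × PySem.Set String × BTree)) : Prop :=
  (h.flatMap fun e => hufLeaves e.2.2).Nodup ∧
  (∀ c, c ∈ (h.flatMap fun e => hufLeaves e.2.2) ↔ c ∈ keys) ∧
  (∀ e ∈ h, e.2.1.Nodup ∧ (∀ c, c ∈ e.2.1 ↔ c ∈ hufLeaves e.2.2) ∧ e.1 = btFreq e.2.2)

theorem pvINV_perm {keys : List String} {h h' : List (Int × PySem.Set String × BTree)}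
    (hp : List.Perm h h') (hi : hufINV keys h) : hufINV keys h' := by
  obtain ⟨h1, h2, h3⟩ := hi
  have hfm : List.Perm (h.flatMap fun e => hufLeaves e.2.2) (h'.flatMap fun e => hufLeaves e.2.2) :=
    hp.flatMap (by intro a _; exact List.Perm.refl _)
  exact ⟨hfm.nodup_iff.mp h1, fun c => (hfm.mem_iff (a := c)).symm.trans (h2 c),
    fun e he => h3 e (hp.mem_iff.mpr he)⟩

theorem pvSumD_perm {h h' : List (Int × PySem.Set String × BTree)}
    (hp : List.Perm h h') (c : String) : hufSumD h c = hufSumD h' c :=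
  (hp.map _).sum_eq

theorem pvDepthIn_not_mem : ∀ (t : BTree) (c : String), c ∉ hufLeaves t → hufDepthIn t c = 0
  | BTree.leaf _ _, _, _ => rfl
  | BTree.node _ l r, c, h => by
    simp only [hufLeaves, List.mem_append] at h
    rw [not_or] at h
    simp [hufDepthIn, pvDepthIn_not_mem l c h.1, pvDepthIn_not_mem r c h.2, h.1, h.2]

theorem pvCount_nodup (s : List String) (hs : s.Nodup) (c : String) :
    (s.count c : Int) = if c ∈ s then 1 else 0 := by
  by_cases h : c ∈ s
  · rw [List.nodup_iff_count_eq_one.mp hs c h]; simp [h]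
  · rw [List.count_eq_zero.mpr h]; simp [h]

theorem pvLeaves_ne_nil : ∀ (t : BTree), hufLeaves t ≠ []
  | BTree.leaf _ _ => by simp [hufLeaves]
  | BTree.node _ l r => by
    simp only [hufLeaves]
    intro h
    exact pvLeaves_ne_nil l (List.append_eq_nil_iff.mp h).1

-- distinct heap entries have disjoint leaf-sets
theorem pvFlat_disj {α β : Type} (f : α → List β) :
    ∀ (L : List α), (L.flatMap f).Nodup →
      ∀ x ∈ L, ∀ y ∈ L, x ≠ y → ∀ c ∈ f x, c ∉ f y
  | [], _, x, hx, _, _, _, _, _ => by simp at hx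
  | z :: t, hnd, x, hx, y, hy, hxy, c, hc => by
    rw [List.flatMap_cons, List.nodup_append] at hnd
    obtain ⟨hz, ht, hdisj⟩ := hnd
    rcases List.mem_cons.mp hx with hxz | hxt
    · rcases List.mem_cons.mp hy with hyz | hyt
      · exact absurd (hxz.trans hyz.symm) hxy
      · subst hxz
        intro hcy
        exact hdisj c hc c (List.mem_flatMap.mpr ⟨y, hyt, hcy⟩) rfl
    · rcases List.mem_cons.mp hy with hyz | hyt
      · subst hyz
        intro hcy
        exact hdisj c hcy c (List.mem_flatMap.mpr ⟨x, hxt, hc⟩) rfl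
      · exact pvFlat_disj f t ht x hxt y hyt hxy c hc

-- on the entries of an invariant-carrying heap, A's tuple `<` is frequency `<`
theorem pvLt_agree {keys : List String} {L : List (Int × PySem.Set String × BTree)}
    (hinv : hufINV keys L) :
    ∀ x ∈ L, ∀ y ∈ L, hufLtB x y = btLt x.2.2 y.2.2 := by
  obtain ⟨n1, n2, n3⟩ := hinv
  intro x hx y hy
  have hfx := (n3 x hx).2.2
  have hfy := (n3 y hy).2.2
  have hbt : btLt x.2.2 y.2.2 = decide (x.1 < y.1) := by
    simp [btLt, ← hfx, ← hfy]
  rw [hbt]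
  show hufLt (x.1, x.2.1) (y.1, y.2.1) = decide (x.1 < y.1)
  unfold hufLt
  by_cases hxy : x = y
  · subst hxy
    have heq : PySem.Set.equal x.2.1 x.2.1 = true := (PySem.Set.equal_iff _ _).mpr (fun _ => Iff.rfl)
    simp [heq]
  · obtain ⟨cw, hcw⟩ := List.exists_mem_of_ne_nil _ (pvLeaves_ne_nil x.2.2)
    have hcx : cw ∈ x.2.1 := ((n3 x hx).2.1 cw).mpr hcw
    have hcny : cw ∉ y.2.1 := by
      intro hmem
      exact pvFlat_disj _ L n1 x hx y hy hxy cw hcw (((n3 y hy).2.1 cw).mp hmem)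
    have hsub : PySem.Set.issubset x.2.1 y.2.1 = false := by
      rw [Bool.eq_false_iff]
      intro hs
      exact hcny ((PySem.Set.issubset_iff _ _).mp hs cw hcx)
    simp [hsub]

-- ---- the heapq helpers commute with projecting away the tree (ghost → A) ----

theorem pvSdLoop_map {α β : Type} (ltb : β → β → Bool) (lta : α → α → Bool) (π : α → β)
    (hlt : ∀ x y, lta x y = ltb (π x) (π y)) (d x : α) :
    ∀ (fuel : Nat) (l : List α) (s p : Nat),
      hpSiftdownLoop ltb (π d) (π x) fuel (l.map π) s p =
        ((hpSiftdownLoop lta d x fuel l s p).1.map π, (hpSiftdownLoop lta d x fuel l s p).2)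
  | 0, l, s, p => rfl
  | fuel + 1, l, s, p => by
    simp only [hpSiftdownLoop]
    by_cases h : s < p
    · simp only [if_pos h, pvGetD_map, ← hlt]
      by_cases h2 : lta x (l.getD ((p - 1) / 2) d)
      · simp only [if_pos h2, ← List.map_set]
        exact pvSdLoop_map ltb lta π hlt d x fuel _ s _
      · simp only [if_neg h2]
    · simp only [if_neg h]

theorem pvSiftdown_map {α β : Type} (ltb : β → β → Bool) (lta : α → α → Bool) (π : α → β)
    (hlt : ∀ x y, lta x y = ltb (π x) (π y)) (d : α) (l : List α) (s p : Nat) :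
    hpSiftdown ltb (π d) (l.map π) s p = (hpSiftdown lta d l s p).map π := by
  unfold hpSiftdown
  rw [pvGetD_map, pvSdLoop_map ltb lta π hlt d _ p l s p]
  simp [List.map_set]

theorem pvSuLoop_map {α β : Type} (ltb : β → β → Bool) (lta : α → α → Bool) (π : α → β)
    (hlt : ∀ x y, lta x y = ltb (π x) (π y)) (d : α) :
    ∀ (fuel endpos : Nat) (l : List α) (p c : Nat),
      hpSiftupLoop ltb (π d) endpos fuel (l.map π) p c =
        ((hpSiftupLoop lta d endpos fuel l p c).1.map π, (hpSiftupLoop lta d endpos fuel l p c).2)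
  | 0, endpos, l, p, c => rfl
  | fuel + 1, endpos, l, p, c => by
    simp only [hpSiftupLoop]
    by_cases h : c < endpos
    · simp only [if_pos h, pvGetD_map, ← hlt, ← List.map_set]
      exact pvSuLoop_map ltb lta π hlt d fuel endpos _ _ _
    · simp only [if_neg h]

theorem pvSiftup_map {α β : Type} (ltb : β → β → Bool) (lta : α → α → Bool) (π : α → β)
    (hlt : ∀ x y, lta x y = ltb (π x) (π y)) (d : α) (l : List α) (p : Nat) :
    hpSiftup ltb (π d) (l.map π) p = (hpSiftup lta d l p).map π := by
  unfold hpSiftup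
  rw [List.length_map, pvGetD_map, pvSuLoop_map ltb lta π hlt d]
  rw [← List.map_set, pvSiftdown_map ltb lta π hlt d]

theorem pvHeapifyFold_map {α β : Type} (ltb : β → β → Bool) (lta : α → α → Bool) (π : α → β)
    (hlt : ∀ x y, lta x y = ltb (π x) (π y)) (d : α) :
    ∀ (idxs : List Nat) (l : List α),
      idxs.foldl (fun h i => hpSiftup ltb (π d) h i) (l.map π) =
        (idxs.foldl (fun h i => hpSiftup lta d h i) l).map π
  | [], l => rfl
  | i :: t, l => by
    simp only [List.foldl_cons]
    rw [pvSiftup_map ltb lta π hlt d, pvHeapifyFold_map ltb lta π hlt d t]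

theorem pvHeapify_map {α β : Type} (ltb : β → β → Bool) (lta : α → α → Bool) (π : α → β)
    (hlt : ∀ x y, lta x y = ltb (π x) (π y)) (d : α) (l : List α) :
    hpHeapify ltb (π d) (l.map π) = (hpHeapify lta d l).map π := by
  unfold hpHeapify
  rw [List.length_map]
  exact pvHeapifyFold_map ltb lta π hlt d _ l

theorem pvPush_map {α β : Type} (ltb : β → β → Bool) (lta : α → α → Bool) (π : α → β)
    (hlt : ∀ x y, lta x y = ltb (π x) (π y)) (d : α) (l : List α) (x : α) :
    hpPush ltb (π d) (l.map π) (π x) = (hpPush lta d l x).map π := by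
  unfold hpPush
  rw [List.length_map, show l.map π ++ [π x] = (l ++ [x]).map π by simp]
  exact pvSiftdown_map ltb lta π hlt d _ 0 l.length

theorem pvPop_map {α β : Type} (ltb : β → β → Bool) (lta : α → α → Bool) (π : α → β)
    (hlt : ∀ x y, lta x y = ltb (π x) (π y)) (d : α) (l : List α) (hl : l ≠ []) :
    hpPop ltb (π d) (l.map π) = (π (hpPop lta d l).1, (hpPop lta d l).2.map π) := by
  unfold hpPop
  rw [if_neg (show ¬((l.map π).isEmpty = true) by simp [List.isEmpty_iff, hl]),
    if_neg (show ¬(l.isEmpty = true) by simp [List.isEmpty_iff, hl]),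
    List.length_map, pvGetD_map]
  by_cases hr : l.dropLast.isEmpty
  · rw [if_pos (show (((l.map π).dropLast).isEmpty = true) by
        rw [← List.map_dropLast]
        simp only [List.isEmpty_iff] at hr ⊢
        simp [hr]),
      if_pos hr]
    simp
  · rw [if_neg (show ¬(((l.map π).dropLast).isEmpty = true) by
        rw [← List.map_dropLast]
        simp only [List.isEmpty_iff] at hr ⊢
        exact fun hmap => hr (List.map_eq_nil_iff.mp hmap)),
      if_neg hr]
    rw [← List.map_dropLast, pvGetD_map, ← List.map_set, pvSiftup_map ltb lta π hlt d]

-- ---- B's Array heap mirrors the ghost heap through hufTr, given `<`-agreement on S ----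

theorem pvTrGetD (l : List (Int × PySem.Set String × BTree)) (i : Nat) :
    (l.map hufTr).getD i bhDflt = hufTr (l.getD i hufDfltB) :=
  pvGetD_map hufTr l hufDfltB i

theorem pvBSdLoop (S : Int × PySem.Set String × BTree → Prop)
    (hG : ∀ x y, S x → S y → hufLtB x y = btLt x.2.2 y.2.2) :
    ∀ (fuel : Nat) (l : List (Int × PySem.Set String × BTree)) (s p : Nat)
      (x : Int × PySem.Set String × BTree) (b : BTree),
      S x → (∀ a ∈ l, S a) → p < l.length →
      bhSdLoop x.2.2 fuel (Array.mk ((l.map hufTr).set p b)) s p =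
        Array.mk (((hpSiftdownLoop hufLtB hufDfltB x fuel l s p).1.set
          (hpSiftdownLoop hufLtB hufDfltB x fuel l s p).2 x).map hufTr)
  | 0, l, s, p, x, b, hx, hl, hp => by
    simp only [bhSdLoop, hpSiftdownLoop, pvASet, List.set_set, List.map_set, hufTr]
  | fuel + 1, l, s, p, x, b, hx, hl, hp => by
    simp only [bhSdLoop, hpSiftdownLoop]
    by_cases h : s < p
    · simp only [if_pos h]
      have hpp : (p - 1) / 2 < p := by have := Nat.div_le_self (p - 1) 2; omega
      have hread : (Array.mk ((l.map hufTr).set p b)).getD ((p - 1) / 2) bhDflt =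
          hufTr (l.getD ((p - 1) / 2) hufDfltB) := by
        rw [pvAGetD, pvGetD_set_ne _ _ _ _ _ (by omega)]
        exact pvGetD_map hufTr l hufDfltB _
      rw [hread]
      have hparS : S (l.getD ((p - 1) / 2) hufDfltB) := by
        have : l.getD ((p - 1) / 2) hufDfltB ∈ l := by
          rw [List.getD_eq_getElem _ _ (by omega)]
          exact List.getElem_mem _
        exact hl _ this
      have hcmp : btLt x.2.2 (hufTr (l.getD ((p - 1) / 2) hufDfltB)) =
          hufLtB x (l.getD ((p - 1) / 2) hufDfltB) := (hG x _ hx hparS).symm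
      rw [hcmp]
      by_cases h2 : hufLtB x (l.getD ((p - 1) / 2) hufDfltB)
      · simp only [if_pos h2]
        have e1 : (Array.mk ((l.map hufTr).set p b)).setIfInBounds p
            (hufTr (l.getD ((p - 1) / 2) hufDfltB)) =
            Array.mk (((l.set p (l.getD ((p - 1) / 2) hufDfltB)).map hufTr).set ((p - 1) / 2)
              (((l.set p (l.getD ((p - 1) / 2) hufDfltB)).map hufTr).getD ((p - 1) / 2) bhDflt)) := by
          rw [pvASet, List.set_set, ← List.map_set,
            pvSet_getD_self _ _ _ (by simp only [List.length_map, List.length_set]; omega)]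
        rw [e1, pvBSdLoop S hG fuel (l.set p (l.getD ((p - 1) / 2) hufDfltB)) s ((p - 1) / 2) x _
          hx (fun a ha => (pvMem_set ha).elim (fun h' => h'.symm ▸ hparS) (hl a))
          (by simp only [List.length_set]; omega)]
      · simp only [if_neg h2, pvASet, List.set_set, List.map_set, hufTr]
    · simp only [if_neg h, pvASet, List.set_set, List.map_set, hufTr]

theorem pvBSiftdown (S : Int × PySem.Set String × BTree → Prop)
    (hG : ∀ x y, S x → S y → hufLtB x y = btLt x.2.2 y.2.2)
    (l : List (Int × PySem.Set String × BTree)) (s p : Nat)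
    (hl : ∀ a ∈ l, S a) (hp : p < l.length) :
    bhSiftdown (Array.mk (l.map hufTr)) s p =
      Array.mk ((hpSiftdown hufLtB hufDfltB l s p).map hufTr) := by
  unfold bhSiftdown hpSiftdown
  have hx : l.getD p hufDfltB ∈ l := by
    rw [List.getD_eq_getElem _ _ hp]; exact List.getElem_mem _
  have hget : (Array.mk (l.map hufTr)).getD p bhDflt = hufTr (l.getD p hufDfltB) := by
    rw [pvAGetD]; exact pvGetD_map hufTr l hufDfltB p
  rw [hget]
  have e : (l.map hufTr) = (l.map hufTr).set p ((l.map hufTr).getD p bhDflt) :=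
    (pvSet_getD_self _ p bhDflt (by simpa using hp)).symm
  rw [show Array.mk (l.map hufTr) = Array.mk ((l.map hufTr).set p ((l.map hufTr).getD p bhDflt))
      from by rw [← e]]
  exact pvBSdLoop S hG p l s p (l.getD p hufDfltB) _ (hl _ hx) hl hp

theorem pvBSuLoop (S : Int × PySem.Set String × BTree → Prop)
    (hG : ∀ x y, S x → S y → hufLtB x y = btLt x.2.2 y.2.2) (s0 : Nat)
    (x : Int × PySem.Set String × BTree) :
    ∀ (fuel endpos : Nat) (l : List (Int × PySem.Set String × BTree)) (p c : Nat),
      endpos = l.length → p < l.length → p < c → S x → (∀ a ∈ l, S a) →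
      bhSuLoop s0 x.2.2 endpos fuel (Array.mk (l.map hufTr)) p c =
        Array.mk ((hpSiftdown hufLtB hufDfltB
          ((hpSiftupLoop hufLtB hufDfltB endpos fuel l p c).1.set
            (hpSiftupLoop hufLtB hufDfltB endpos fuel l p c).2 x)
          s0 (hpSiftupLoop hufLtB hufDfltB endpos fuel l p c).2).map hufTr)
  | 0, endpos, l, p, c, he, hp, hpc, hx, hl => by
    simp only [bhSuLoop, hpSiftupLoop]
    unfold hpSiftdown
    have hgx : ((l.set p x).getD p hufDfltB) = x := by
      rw [List.getD_eq_getElem _ _ (by simpa using hp)]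
      exact List.getElem_set_self _
    rw [hgx]
    have e2 : (l.map hufTr) = ((l.set p x).map hufTr).set p ((l.map hufTr).getD p bhDflt) := by
      rw [List.map_set, List.set_set, pvSet_getD_self _ _ _ (by simpa using hp)]
    rw [show Array.mk (l.map hufTr) =
        Array.mk (((l.set p x).map hufTr).set p ((l.map hufTr).getD p bhDflt)) from by rw [← e2]]
    exact pvBSdLoop S hG p (l.set p x) s0 p x _ hx
      (fun a ha => (pvMem_set ha).elim (fun h' => h'.symm ▸ hx) (hl a))
      (by simpa using hp)
  | fuel + 1, endpos, l, p, c, he, hp, hpc, hx, hl => by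
    simp only [bhSuLoop, hpSiftupLoop]
    by_cases h : c < endpos
    · simp only [if_pos h]
      have hc : c < l.length := he ▸ h
      have hguard :
          (decide (c + 1 < endpos) &&
            !(btLt ((Array.mk (l.map hufTr)).getD c bhDflt)
              ((Array.mk (l.map hufTr)).getD (c + 1) bhDflt))) =
          (decide (c + 1 < endpos) &&
            !(hufLtB (l.getD c hufDfltB) (l.getD (c + 1) hufDfltB))) := by
        by_cases hc1 : c + 1 < endpos
        · have hc1l : c + 1 < l.length := he ▸ hc1
          rw [pvAGetD, pvAGetD, pvTrGetD, pvTrGetD]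
          simp only [hufTr]
          congr 1
          rw [hG (l.getD c hufDfltB) (l.getD (c + 1) hufDfltB)
            (hl _ (by rw [List.getD_eq_getElem _ _ hc]; exact List.getElem_mem _))
            (hl _ (by rw [List.getD_eq_getElem _ _ hc1l]; exact List.getElem_mem _))]
        · simp [hc1]
      rw [hguard]
      set c' := if (decide (c + 1 < endpos) &&
          !(hufLtB (l.getD c hufDfltB) (l.getD (c + 1) hufDfltB))) = true then c + 1 else c
        with hc'
      have hc'lt : c' < endpos := by
        rw [hc']; split
        · next hcond => exact of_decide_eq_true (Bool.and_eq_true_iff.mp hcond).1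
        · exact h
      have hc'l : c' < l.length := he ▸ hc'lt
      have hset : (Array.mk (l.map hufTr)).setIfInBounds p
          ((Array.mk (l.map hufTr)).getD c' bhDflt) =
          Array.mk ((l.set p (l.getD c' hufDfltB)).map hufTr) := by
        rw [pvAGetD, pvTrGetD, pvASet, List.map_set]
      rw [hset]
      exact pvBSuLoop S hG s0 x fuel endpos (l.set p (l.getD c' hufDfltB)) c' (2 * c' + 1)
        (by simpa using he) (by simpa using hc'l) (by omega) hx
        (fun a ha => (pvMem_set ha).elim
          (fun h' => h'.symm ▸ hl _ (by rw [List.getD_eq_getElem _ _ hc'l]; exact List.getElem_mem _))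
          (hl a))
    · simp only [if_neg h]
      unfold hpSiftdown
      have hgx : ((l.set p x).getD p hufDfltB) = x := by
        rw [List.getD_eq_getElem _ _ (by simpa using hp)]
        exact List.getElem_set_self _
      rw [hgx]
      have e2 : (l.map hufTr) = ((l.set p x).map hufTr).set p ((l.map hufTr).getD p bhDflt) := by
        rw [List.map_set, List.set_set, pvSet_getD_self _ _ _ (by simpa using hp)]
      rw [show Array.mk (l.map hufTr) =
          Array.mk (((l.set p x).map hufTr).set p ((l.map hufTr).getD p bhDflt)) from by
            rw [← e2]]
      exact pvBSdLoop S hG p (l.set p x) s0 p x _ hx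
        (fun a ha => (pvMem_set ha).elim (fun h' => h'.symm ▸ hx) (hl a))
        (by simpa using hp)

theorem pvBSiftup (S : Int × PySem.Set String × BTree → Prop)
    (hG : ∀ x y, S x → S y → hufLtB x y = btLt x.2.2 y.2.2)
    (l : List (Int × PySem.Set String × BTree)) (p : Nat)
    (hl : ∀ a ∈ l, S a) (hp : p < l.length) :
    bhSiftup (Array.mk (l.map hufTr)) p =
      Array.mk ((hpSiftup hufLtB hufDfltB l p).map hufTr) := by
  unfold bhSiftup hpSiftup
  have hget : (Array.mk (l.map hufTr)).getD p bhDflt = hufTr (l.getD p hufDfltB) := by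
    rw [pvAGetD]; exact pvGetD_map hufTr l hufDfltB p
  rw [hget, pvASize, List.length_map]
  exact pvBSuLoop S hG p (l.getD p hufDfltB) l.length l.length l p (2 * p + 1) rfl hp
    (by omega) (hl _ (by rw [List.getD_eq_getElem _ _ hp]; exact List.getElem_mem _)) hl

theorem pvBHeapAux (S : Int × PySem.Set String × BTree → Prop)
    (hG : ∀ x y, S x → S y → hufLtB x y = btLt x.2.2 y.2.2) :
    ∀ (k : Nat) (l : List (Int × PySem.Set String × BTree)), k ≤ l.length → (∀ a ∈ l, S a) →
      bhHeapAux k (Array.mk (l.map hufTr)) =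
        Array.mk ((((List.range k).reverse).foldl (fun h i => hpSiftup hufLtB hufDfltB h i) l).map
          hufTr)
  | 0, l, _, _ => rfl
  | k + 1, l, hk, hl => by
    have hkl : k < l.length := by omega
    simp only [bhHeapAux, List.range_succ, List.reverse_append, List.reverse_cons,
      List.reverse_nil, List.nil_append, List.cons_append, List.foldl_cons]
    rw [pvBSiftup S hG l k hl hkl]
    have hperm := pvSiftup_perm hufLtB hufDfltB l k hkl
    exact pvBHeapAux S hG k (hpSiftup hufLtB hufDfltB l k) (by rw [hperm.length_eq]; omega)
      (fun a ha => hl a (hperm.mem_iff.mp ha))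

theorem pvBHeapify (S : Int × PySem.Set String × BTree → Prop)
    (hG : ∀ x y, S x → S y → hufLtB x y = btLt x.2.2 y.2.2)
    (l : List (Int × PySem.Set String × BTree)) (hl : ∀ a ∈ l, S a) :
    bhHeapify (Array.mk (l.map hufTr)) = Array.mk ((hpHeapify hufLtB hufDfltB l).map hufTr) := by
  unfold bhHeapify hpHeapify
  rw [pvASize, List.length_map]
  exact pvBHeapAux S hG (l.length / 2) l (by have := Nat.div_le_self l.length 2; omega) hl

theorem pvBPush (S : Int × PySem.Set String × BTree → Prop)
    (hG : ∀ x y, S x → S y → hufLtB x y = btLt x.2.2 y.2.2)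
    (l : List (Int × PySem.Set String × BTree)) (x : Int × PySem.Set String × BTree)
    (hl : ∀ a ∈ l, S a) (hx : S x) :
    bhPush (Array.mk (l.map hufTr)) x.2.2 =
      Array.mk ((hpPush hufLtB hufDfltB l x).map hufTr) := by
  unfold bhPush hpPush
  rw [pvAPush, pvASize, List.length_map,
    show l.map hufTr ++ [x.2.2] = (l ++ [x]).map hufTr from by simp [hufTr]]
  exact pvBSiftdown S hG (l ++ [x]) 0 l.length
    (fun a ha => by
      rcases List.mem_append.mp ha with ha | ha
      · exact hl a ha
      · rw [List.mem_singleton.mp ha]; exact hx)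
    (by simp)

theorem pvBPop (S : Int × PySem.Set String × BTree → Prop)
    (hG : ∀ x y, S x → S y → hufLtB x y = btLt x.2.2 y.2.2)
    (l : List (Int × PySem.Set String × BTree)) (hne : l ≠ []) (hl : ∀ a ∈ l, S a) :
    bhPop (Array.mk (l.map hufTr)) =
      (hufTr (hpPop hufLtB hufDfltB l).1, Array.mk ((hpPop hufLtB hufDfltB l).2.map hufTr)) := by
  have hlastmem : l.getD (l.length - 1) hufDfltB ∈ l := by
    rw [List.getD_eq_getElem _ _ (by have := List.length_pos_iff.mpr hne; omega)]
    exact List.getElem_mem _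
  unfold bhPop hpPop
  rw [if_neg (show ¬(l.isEmpty = true) by simp [List.isEmpty_iff, hne])]
  simp only [pvAPop, ← List.map_dropLast, pvASize, List.length_map, pvAGetD, pvTrGetD]
  by_cases hr : l.dropLast.isEmpty
  · have hnil : l.dropLast = [] := by simpa [List.isEmpty_iff] using hr
    rw [hnil]
    simp
  · have hne' : l.dropLast ≠ [] := by simpa [List.isEmpty_iff] using hr
    rw [if_neg (show ¬(l.dropLast.length = 0) from
        fun h0 => hne' (List.length_eq_zero_iff.mp h0)),
      if_neg hr]
    have hsub : ∀ a ∈ l.dropLast.set 0 (l.getD (l.length - 1) hufDfltB), S a := by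
      intro a ha
      exact (pvMem_set ha).elim (fun h' => h'.symm ▸ hl _ hlastmem)
        (fun h' => hl a ((List.dropLast_sublist _).subset h'))
    rw [pvASet, ← List.map_set]
    rw [pvBSiftup S hG _ 0 hsub (by simpa using List.length_pos_iff.mpr hne')]

-- ---- the main loops couple: A's dict of counts, the ghost heap, B's Array heap ----

def pvP1 (h : List (Int × PySem.Set String × BTree)) :
    (Int × PySem.Set String × BTree) × List (Int × PySem.Set String × BTree) :=
  hpPop hufLtB hufDfltB h

def pvP2 (h : List (Int × PySem.Set String × BTree)) :
    (Int × PySem.Set String × BTree) × List (Int × PySem.Set String × BTree) :=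
  hpPop hufLtB hufDfltB (pvP1 h).2

def pvM (h : List (Int × PySem.Set String × BTree)) : Int × PySem.Set String × BTree :=
  ((pvP1 h).1.1 + (pvP2 h).1.1, PySem.Set.union (pvP1 h).1.2.1 (pvP2 h).1.2.1,
    BTree.node ((pvP1 h).1.1 + (pvP2 h).1.1) (pvP1 h).1.2.2 (pvP2 h).1.2.2)

def pvNext (h : List (Int × PySem.Set String × BTree)) : List (Int × PySem.Set String × BTree) :=
  hpPush hufLtB hufDfltB (pvP2 h).2 (pvM h)

theorem pvP12_ne (h : List (Int × PySem.Set String × BTree)) (hlen : 1 < h.length) :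
    (pvP1 h).2 ≠ [] := by
  have hne : h ≠ [] := by intro e; subst e; simp at hlen
  have perm1 := pvPop_perm hufLtB hufDfltB h hne
  have h1 : (pvP1 h).2.length = h.length - 1 := by
    have := perm1.length_eq; simp only [List.length_cons] at this
    show (hpPop hufLtB hufDfltB h).2.length = h.length - 1
    omega
  intro e
  rw [e] at h1
  simp at h1
  omega

theorem pvStep_perm (h : List (Int × PySem.Set String × BTree)) (hlen : 1 < h.length) :
    List.Perm h ((pvP1 h).1 :: (pvP2 h).1 :: (pvP2 h).2) := by
  have hne : h ≠ [] := by intro e; subst e; simp at hlen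
  have perm1 := pvPop_perm hufLtB hufDfltB h hne
  have perm2 := pvPop_perm hufLtB hufDfltB (pvP1 h).2 (pvP12_ne h hlen)
  exact perm1.symm.trans (List.Perm.cons (pvP1 h).1 perm2.symm)

theorem pvNext_perm (h : List (Int × PySem.Set String × BTree)) :
    List.Perm (pvNext h) (pvM h :: (pvP2 h).2) :=
  pvPush_perm hufLtB hufDfltB (pvP2 h).2 (pvM h)

theorem pvNext_len (h : List (Int × PySem.Set String × BTree)) (hlen : 1 < h.length) :
    (pvNext h).length = h.length - 1 := by
  have h1 := (pvStep_perm h hlen).length_eq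
  have h2 := (pvNext_perm h).length_eq
  simp only [List.length_cons] at h1 h2
  omega

theorem pvStep_INV (keys : List String) (h : List (Int × PySem.Set String × BTree))
    (hinv : hufINV keys h) (hlen : 1 < h.length) : hufINV keys (pvNext h) := by
  obtain ⟨n1, n2, n3⟩ := pvINV_perm (pvStep_perm h hlen) hinv
  apply pvINV_perm (pvNext_perm h).symm
  refine ⟨?_, ?_, ?_⟩
  · simpa [List.flatMap_cons, pvM, hufLeaves, List.append_assoc] using n1
  · intro c
    have := n2 c
    simpa [List.flatMap_cons, pvM, hufLeaves, List.append_assoc] using this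
  · intro e he
    rcases List.mem_cons.mp he with rfl | he2
    · refine ⟨PySem.Set.nodup_union _ _ (n3 (pvP1 h).1 (by simp)).1, ?_, rfl⟩
      intro c
      show c ∈ PySem.Set.union (pvP1 h).1.2.1 (pvP2 h).1.2.1 ↔ _
      rw [PySem.Set.mem_union]
      show _ ↔ c ∈ hufLeaves (BTree.node ((pvP1 h).1.1 + (pvP2 h).1.1) (pvP1 h).1.2.2 (pvP2 h).1.2.2)
      simp only [hufLeaves, List.mem_append]
      exact or_congr ((n3 (pvP1 h).1 (by simp)).2.1 c) ((n3 (pvP2 h).1 (by simp)).2.1 c)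
    · exact n3 e (by simp [he2])

theorem pvStep_memkeys (keys : List String) (h : List (Int × PySem.Set String × BTree))
    (hinv : hufINV keys h) (hlen : 1 < h.length) :
    (∀ c ∈ (pvP1 h).1.2.1, c ∈ keys) ∧ (∀ c ∈ (pvP2 h).1.2.1, c ∈ keys) := by
  obtain ⟨n1, n2, n3⟩ := pvINV_perm (pvStep_perm h hlen) hinv
  constructor <;> intro c hc
  · have hm : c ∈ hufLeaves (pvP1 h).1.2.2 := ((n3 (pvP1 h).1 (by simp)).2.1 c).mp hc
    exact (n2 c).mp (List.mem_flatMap.mpr ⟨(pvP1 h).1, by simp, hm⟩)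
  · have hm : c ∈ hufLeaves (pvP2 h).1.2.2 := ((n3 (pvP2 h).1 (by simp)).2.1 c).mp hc
    exact (n2 c).mp (List.mem_flatMap.mpr ⟨(pvP2 h).1, by simp, hm⟩)

theorem pvStep_sum (keys : List String) (h : List (Int × PySem.Set String × BTree))
    (hinv : hufINV keys h) (hlen : 1 < h.length) (c : String) :
    hufSumD (pvNext h) c =
      hufSumD h c + ((pvP1 h).1.2.1.count c : Int) + ((pvP2 h).1.2.1.count c : Int) := by
  obtain ⟨n1, n2, n3⟩ := pvINV_perm (pvStep_perm h hlen) hinv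
  have e1 : ((pvP1 h).1.2.1.count c : Int) = if c ∈ hufLeaves (pvP1 h).1.2.2 then 1 else 0 := by
    rw [pvCount_nodup _ (n3 (pvP1 h).1 (by simp)).1 c]
    by_cases hm : c ∈ (pvP1 h).1.2.1
    · rw [if_pos hm, if_pos (((n3 (pvP1 h).1 (by simp)).2.1 c).mp hm)]
    · rw [if_neg hm, if_neg (fun hx => hm (((n3 (pvP1 h).1 (by simp)).2.1 c).mpr hx))]
  have e2 : ((pvP2 h).1.2.1.count c : Int) = if c ∈ hufLeaves (pvP2 h).1.2.2 then 1 else 0 := by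
    rw [pvCount_nodup _ (n3 (pvP2 h).1 (by simp)).1 c]
    by_cases hm : c ∈ (pvP2 h).1.2.1
    · rw [if_pos hm, if_pos (((n3 (pvP2 h).1 (by simp)).2.1 c).mp hm)]
    · rw [if_neg hm, if_neg (fun hx => hm (((n3 (pvP2 h).1 (by simp)).2.1 c).mpr hx))]
  rw [pvSumD_perm (pvNext_perm h) c, pvSumD_perm (pvStep_perm h hlen) c, e1, e2]
  simp only [hufSumD, List.map_cons, List.sum_cons, pvM, hufDepthIn]
  ring

theorem pvLoopB_succ (fuel : Nat) (h : List (Int × PySem.Set String × BTree))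
    (hlen : 1 < h.length) : hufLoopB (fuel + 1) h = hufLoopB fuel (pvNext h) := by
  simp only [hufLoopB, if_pos hlen]
  rfl

theorem pvLoopB_spec (keys : List String) :
    ∀ (fuel : Nat) (h : List (Int × PySem.Set String × BTree)), hufINV keys h →
      hufINV keys (hufLoopB fuel h) ∧
      (1 ≤ h.length → 1 ≤ (hufLoopB fuel h).length) ∧
      (h.length ≤ fuel + 1 → (hufLoopB fuel h).length ≤ 1)
  | 0, h, hinv => by
    simp only [hufLoopB]
    exact ⟨hinv, fun h1 => h1, fun h1 => by omega⟩
  | fuel + 1, h, hinv => by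
    by_cases hlen : 1 < h.length
    · rw [pvLoopB_succ fuel h hlen]
      obtain ⟨i1, i2, i3⟩ := pvLoopB_spec keys fuel (pvNext h) (pvStep_INV keys h hinv hlen)
      have hl := pvNext_len h hlen
      exact ⟨i1, fun _ => i2 (by omega), fun hf => i3 (by omega)⟩
    · simp only [hufLoopB, if_neg hlen]
      exact ⟨hinv, fun h1 => h1, fun _ => by omega⟩

-- B's loop tracks the ghost loop through hufTr
theorem pvBLoop (keys : List String) :
    ∀ (fuel : Nat) (h : List (Int × PySem.Set String × BTree)), hufINV keys h →
      bhLoop fuel (Array.mk (h.map hufTr)) = Array.mk ((hufLoopB fuel h).map hufTr)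
  | 0, h, _ => rfl
  | fuel + 1, h, hinv => by
    by_cases hlen : 1 < h.length
    · rw [pvLoopB_succ fuel h hlen]
      simp only [bhLoop, pvASize, List.length_map, if_pos hlen]
      have hne : h ≠ [] := by intro e; subst e; simp at hlen
      have hG1 := pvLt_agree hinv
      have hp1 : bhPop (Array.mk (h.map hufTr)) =
          (hufTr (pvP1 h).1, Array.mk ((pvP1 h).2.map hufTr)) :=
        pvBPop (· ∈ h) (fun x y hx hy => hG1 x hx y hy) h hne (fun _ ha => ha)
      rw [hp1]
      have hmem1 : ∀ a ∈ (pvP1 h).2, a ∈ h := by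
        intro a ha
        exact (pvPop_perm hufLtB hufDfltB h hne).mem_iff.mp (List.mem_cons_of_mem _ ha)
      have hp2 : bhPop (Array.mk ((pvP1 h).2.map hufTr)) =
          (hufTr (pvP2 h).1, Array.mk ((pvP2 h).2.map hufTr)) :=
        pvBPop (· ∈ h) (fun x y hx hy => hG1 x hx y hy) (pvP1 h).2 (pvP12_ne h hlen) hmem1
      rw [hp2]
      obtain ⟨m1, m2, m3⟩ := pvINV_perm (pvStep_perm h hlen) hinv
      have hf1 : btFreq (hufTr (pvP1 h).1) = (pvP1 h).1.1 := ((m3 (pvP1 h).1 (by simp)).2.2).symm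
      have hf2 : btFreq (hufTr (pvP2 h).1) = (pvP2 h).1.1 := ((m3 (pvP2 h).1 (by simp)).2.2).symm
      have hnode : BTree.node (btFreq (hufTr (pvP1 h).1) + btFreq (hufTr (pvP2 h).1))
          (hufTr (pvP1 h).1) (hufTr (pvP2 h).1) = (pvM h).2.2 := by
        rw [hf1, hf2]; rfl
      rw [hnode]
      have hinvN := pvStep_INV keys h hinv hlen
      have hinvM : hufINV keys (pvM h :: (pvP2 h).2) := pvINV_perm (pvNext_perm h) hinvN
      have hGm := pvLt_agree hinvM
      have hpush : bhPush (Array.mk ((pvP2 h).2.map hufTr)) (pvM h).2.2 =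
          Array.mk ((pvNext h).map hufTr) :=
        pvBPush (· ∈ pvM h :: (pvP2 h).2) (fun x y hx hy => hGm x hx y hy)
          (pvP2 h).2 (pvM h) (fun a ha => by simp [ha]) (by simp)
      rw [hpush]
      exact pvBLoop keys fuel (pvNext h) hinvN
    · simp only [bhLoop, hufLoopB, pvASize, List.length_map, if_neg hlen]

-- ---- A's dict of counts stays in `keys.map (c, v c)` shape ----

theorem pvModify_mk_map (keys : List String) (hk : keys.Nodup) (v : String → Int) (c0 : String)
    (h0 : c0 ∈ keys) :
    (PySem.Dict.mk (keys.map fun c => (c, v c))).modify c0 0 (· + 1) =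
      PySem.Dict.mk (keys.map fun c => (c, if c = c0 then v c + 1 else v c)) := by
  have hkeys : (PySem.Dict.mk (keys.map fun c => (c, v c))).keys = keys := by
    show (keys.map fun c => (c, v c)).map Prod.fst = keys
    rw [List.map_map]
    exact (List.map_congr_left fun c _ => rfl).trans (List.map_id _)
  have hcont : (PySem.Dict.mk (keys.map fun c => (c, v c))).contains c0 = true := by
    rw [PySem.Dict.contains_eq_decide_mem_keys, hkeys]
    simpa using h0
  have hget : (PySem.Dict.mk (keys.map fun c => (c, v c))).getD c0 0 = v c0 :=
    PySem.Dict.getD_of_mem_items _ ((List.mem_map (f := fun c => (c, v c))).mpr ⟨c0, h0, rfl⟩) (by rw [hkeys]; exact hk) 0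
  show (PySem.Dict.mk (keys.map fun c => (c, v c))).insert c0
      ((PySem.Dict.mk (keys.map fun c => (c, v c))).getD c0 0 + 1) = _
  rw [hget]
  apply PySem.Dict.ext
  rw [PySem.Dict.items_insert_of_contains _ _ hcont]
  show (List.map _ _).map _ = _
  rw [List.map_map]
  apply List.map_congr_left
  intro c _
  by_cases h : c = c0 <;> simp [h]

theorem pvHufInc_mk_map (keys : List String) (hk : keys.Nodup) :
    ∀ (s : List String) (v : String → Int), (∀ c ∈ s, c ∈ keys) →
      hufInc s (PySem.Dict.mk (keys.map fun c => (c, v c))) =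
        PySem.Dict.mk (keys.map fun c => (c, v c + (s.count c : Int)))
  | [], v, _ => by
    simp only [hufInc, List.foldl_nil]
    congr 1
    apply List.map_congr_left
    intro c _; simp
  | c0 :: s, v, hs => by
    simp only [hufInc, List.foldl_cons]
    rw [pvModify_mk_map keys hk v c0 (hs c0 (by simp))]
    have ih := pvHufInc_mk_map keys hk s (fun c => if c = c0 then v c + 1 else v c)
      (fun c hc => hs c (by simp [hc]))
    simp only [hufInc] at ih
    rw [ih]
    congr 1
    apply List.map_congr_left
    intro c _
    rw [Prod.mk.injEq]
    refine ⟨rfl, ?_⟩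
    by_cases h : c = c0
    · subst h
      rw [if_pos rfl, List.count_cons_self]
      push_cast
      ring
    · rw [if_neg h, List.count_cons_of_ne (fun e => h e.symm)]

-- ---- A's count loop tracks the ghost loop through hufProj ----

theorem pvLoop_sim (keys : List String) (hk : keys.Nodup) :
    ∀ (fuel : Nat) (h : List (Int × PySem.Set String × BTree)) (v : String → Int),
      hufINV keys h →
      hufLoopA fuel (h.map hufProj) (PySem.Dict.mk (keys.map fun c => (c, v c + hufSumD h c))) =
        PySem.Dict.mk (keys.map fun c => (c, v c + hufSumD (hufLoopB fuel h) c))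
  | 0, h, v, _ => by simp only [hufLoopA, hufLoopB]
  | fuel + 1, h, v, hinv => by
    by_cases hlen : 1 < h.length
    · have hne : h ≠ [] := by intro e; subst e; simp at hlen
      have hmaplen : 1 < (h.map hufProj).length := by simpa using hlen
      simp only [hufLoopA, if_pos hmaplen]
      have hp1 : hpPop hufLt hufDfltA (h.map hufProj) =
          (hufProj (pvP1 h).1, (pvP1 h).2.map hufProj) :=
        pvPop_map hufLt hufLtB hufProj (fun _ _ => rfl) hufDfltB h hne
      rw [hp1]
      dsimp only
      have hp2 : hpPop hufLt hufDfltA ((pvP1 h).2.map hufProj) =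
          (hufProj (pvP2 h).1, (pvP2 h).2.map hufProj) :=
        pvPop_map hufLt hufLtB hufProj (fun _ _ => rfl) hufDfltB (pvP1 h).2 (pvP12_ne h hlen)
      rw [hp2]
      dsimp only [hufProj]
      rw [pvHufInc_mk_map keys hk (pvP1 h).1.2.1 (fun c => v c + hufSumD h c)
        (pvStep_memkeys keys h hinv hlen).1]
      rw [pvHufInc_mk_map keys hk (pvP2 h).1.2.1
        (fun c => v c + hufSumD h c + ((pvP1 h).1.2.1.count c : Int))
        (pvStep_memkeys keys h hinv hlen).2]
      rw [show hpPush hufLt hufDfltA ((pvP2 h).2.map hufProj)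
          ((pvP1 h).1.1 + (pvP2 h).1.1, PySem.Set.union (pvP1 h).1.2.1 (pvP2 h).1.2.1) =
          (pvNext h).map hufProj from
        pvPush_map hufLt hufLtB hufProj (fun _ _ => rfl) hufDfltB (pvP2 h).2 (pvM h)]
      rw [show (PySem.Dict.mk (keys.map fun c =>
            (c, v c + hufSumD h c + ((pvP1 h).1.2.1.count c : Int) +
              ((pvP2 h).1.2.1.count c : Int)))) =
          PySem.Dict.mk (keys.map fun c => (c, v c + hufSumD (pvNext h) c)) from by
        congr 1
        apply List.map_congr_left
        intro c _
        simp only [Prod.mk.injEq]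
        exact ⟨by trivial, by rw [pvStep_sum keys h hinv hlen c]; ring⟩]
      rw [pvLoop_sim keys hk fuel (pvNext h) v (pvStep_INV keys h hinv hlen)]
      rw [pvLoopB_succ fuel h hlen]
    · simp only [hufLoopA, hufLoopB, List.length_map, if_neg hlen]

-- ---- Source B's stack DFS computes each leaf's depth ----

-- recursive reformulation of the stack DFS (subtrees are finished right-to-left)
def hufWalk : BTree → Int → PySem.Dict String Int → PySem.Dict String Int
  | BTree.leaf _ ch, dd, depths => depths.insert ch dd
  | BTree.node _ l r, dd, depths => hufWalk l (dd + 1) (hufWalk r (dd + 1) depths)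

theorem pvBhWalk_append :
    ∀ (s1 s2 : List (BTree × Int)) (acc : PySem.Dict String Int),
      bhWalk (s1 ++ s2) acc = bhWalk s2 (bhWalk s1 acc)
  | [], s2, acc => by simp [bhWalk]
  | (BTree.leaf f ch, d) :: rest, s2, acc => by
    simp only [List.cons_append, bhWalk]
    exact pvBhWalk_append rest s2 _
  | (BTree.node f l r, d) :: rest, s2, acc => by
    simp only [List.cons_append, bhWalk]
    exact pvBhWalk_append ((r, d + 1) :: (l, d + 1) :: rest) s2 acc
  termination_by s1 _ _ => (s1.map (fun p => btSize p.1)).sum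
  decreasing_by all_goals (simp [btSize]; try omega)

theorem pvBhWalk_single : ∀ (t : BTree) (dd : Int) (acc : PySem.Dict String Int),
    bhWalk [(t, dd)] acc = hufWalk t dd acc
  | BTree.leaf f ch, dd, acc => by simp [bhWalk, hufWalk]
  | BTree.node f l r, dd, acc => by
    rw [bhWalk]
    rw [show ((r, dd + 1) :: (l, dd + 1) :: [] : List (BTree × Int)) =
      [(r, dd + 1)] ++ [(l, dd + 1)] from rfl]
    rw [pvBhWalk_append, pvBhWalk_single r, pvBhWalk_single l]
    rfl

theorem pvWalk_get? : ∀ (t : BTree) (dd : Int) (acc : PySem.Dict String Int) (c : String),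
    (hufLeaves t).Nodup →
    (hufWalk t dd acc).get? c =
      if c ∈ hufLeaves t then some (dd + hufDepthIn t c) else acc.get? c
  | BTree.leaf f a, dd, acc, c, _ => by
    simp only [hufWalk, hufLeaves, hufDepthIn, PySem.Dict.get?_insert, List.mem_singleton]
    by_cases h : c = a <;> simp [h]
  | BTree.node f l r, dd, acc, c, hnd => by
    rw [hufLeaves, List.nodup_append] at hnd
    obtain ⟨hl, hr, hdisj⟩ := hnd
    simp only [hufWalk]
    rw [pvWalk_get? l (dd + 1) _ c hl]
    by_cases h : c ∈ hufLeaves l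
    · have hcr : c ∉ hufLeaves r := fun hc => hdisj c h c hc rfl
      rw [if_pos h, if_pos (show c ∈ hufLeaves (BTree.node f l r) by
        simp [hufLeaves, h])]
      have hd : hufDepthIn (BTree.node f l r) c = hufDepthIn l c + 1 := by
        simp [hufDepthIn, pvDepthIn_not_mem r c hcr, hcr, h]
      rw [hd]
      congr 1
      ring
    · rw [if_neg h, pvWalk_get? r (dd + 1) _ c hr]
      by_cases h2 : c ∈ hufLeaves r
      · rw [if_pos h2, if_pos (show c ∈ hufLeaves (BTree.node f l r) by
          simp [hufLeaves, h2])]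
        have hd : hufDepthIn (BTree.node f l r) c = hufDepthIn r c + 1 := by
          simp [hufDepthIn, pvDepthIn_not_mem l c h, h2, h]
        rw [hd]
        congr 1
        ring
      · rw [if_neg h2, if_neg (show ¬ c ∈ hufLeaves (BTree.node f l r) by
          simp [hufLeaves, h2, h])]

-- ---- the initial heap ----

theorem pvInitLeaves : ∀ (l : List (String × Int)),
    ((l.map fun kv => ((kv.2 : Int), PySem.Set.ofList [kv.1], BTree.leaf kv.2 kv.1)).flatMap
      fun e => hufLeaves e.2.2) = l.map Prod.fst
  | [] => rfl
  | kv :: t => by simp [hufLeaves, pvInitLeaves t]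

theorem pvInitSum : ∀ (l : List (String × Int)) (c : String),
    hufSumD (l.map fun kv => ((kv.2 : Int), PySem.Set.ofList [kv.1], BTree.leaf kv.2 kv.1)) c = 0
  | [], _ => rfl
  | kv :: t, c => by
    have ih := pvInitSum t c
    simp only [hufSumD, List.map_cons, List.sum_cons, hufDepthIn, zero_add] at ih ⊢
    exact ih

theorem pvDict_keys_nodup (freqs : List (String × Int)) : (hufDict freqs).keys.Nodup := by
  unfold hufDict
  exact PySem.Dict.nodup_keys_foldl_insert_key freqs Prod.fst (fun _ kv => kv.2)
    PySem.Dict.empty (by simp)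

theorem pvINV_init (freqs : List (String × Int)) :
    hufINV (hufDict freqs).keys
      ((hufDict freqs).items.map fun kv =>
        ((kv.2 : Int), PySem.Set.ofList [kv.1], BTree.leaf kv.2 kv.1)) := by
  refine ⟨?_, ?_, ?_⟩
  · rw [pvInitLeaves]
    exact pvDict_keys_nodup freqs
  · intro c
    rw [pvInitLeaves]
    exact Iff.rfl
  · intro e he
    obtain ⟨kv, hkv, rfl⟩ := List.mem_map.mp he
    refine ⟨PySem.Set.nodup_ofList _, ?_, rfl⟩
    intro c
    show c ∈ PySem.Set.ofList [kv.1] ↔ c ∈ hufLeaves (BTree.leaf kv.2 kv.1)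
    rw [PySem.Set.mem_ofList]
    exact Iff.rfl

-- ===== VERDICT (by name: the statement is the Claim_ definition above) =====
theorem build_huffman_costs_from_freqs_spec : Claim_equal_build_huffman_costs_from_freqs := by
  intro freqs _
  unfold Spec_build_huffman_costs_from_freqs
  simp only [build_huffman_costs_from_freqs, build_huffman_costs_from_freqs_alt]
  have hk : (hufDict freqs).keys.Nodup := pvDict_keys_nodup freqs
  by_cases h0 : (hufDict freqs).items.isEmpty
  · rw [if_pos h0, if_pos h0]
  · rw [if_neg h0, if_neg h0]
    have hdne : (hufDict freqs).items ≠ [] := by simpa [List.isEmpty_iff] using h0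
    set d := hufDict freqs with hd
    set g0 := d.items.map fun kv => ((kv.2 : Int), PySem.Set.ofList [kv.1], BTree.leaf kv.2 kv.1)
      with hg0
    set gH := hpHeapify hufLtB hufDfltB g0 with hgH
    have hINV0 : hufINV d.keys g0 := by rw [hg0, hd]; exact pvINV_init freqs
    have hpermH : List.Perm gH g0 := pvHeapify_perm hufLtB hufDfltB g0
    have hINVH : hufINV d.keys gH := pvINV_perm hpermH.symm hINV0
    have hlenH : gH.length = d.items.length := by rw [hpermH.length_eq, hg0, List.length_map]
    -- A's heap is the ghost heap seen through hufProj
    have hmapA : hpHeapify hufLt hufDfltA (d.items.map fun kv => (kv.2, PySem.Set.ofList [kv.1])) =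
        gH.map hufProj := by
      rw [hgH, ← pvHeapify_map hufLt hufLtB hufProj (fun _ _ => rfl) hufDfltB, hg0,
        List.map_map]
      rfl
    -- B's heap is the ghost heap seen through hufTr
    have hmapB : bhHeapify (Array.mk (d.items.map fun kv => BTree.leaf kv.2 kv.1)) =
        Array.mk (gH.map hufTr) := by
      rw [show (d.items.map fun kv => BTree.leaf kv.2 kv.1) = g0.map hufTr from by
        rw [hg0, List.map_map]; rfl]
      rw [hgH]
      exact pvBHeapify (· ∈ g0) (fun x y hx hy => pvLt_agree hINV0 x hx y hy) g0 (fun a ha => ha)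
    have hlen0 : d.keys.foldl (fun L ch => L.insert ch (0 : Int)) PySem.Dict.empty =
        PySem.Dict.mk (d.keys.map fun c => (c, (0 : Int))) := by
      apply PySem.Dict.ext
      rw [PySem.Dict.items_foldl_insert_fresh d.keys (fun c => c) (fun _ => (0 : Int))
        PySem.Dict.empty (fun a _ => by simp) (by simpa using hk)]
      simp [PySem.Dict.empty]
    rw [hmapA, hlen0]
    simp only [List.length_map, hlenH]
    by_cases h1 : d.items.length = 1
    · rw [if_pos (by simp [h1]), if_pos (by simp [h1])]
      obtain ⟨kv, hkv⟩ := List.length_eq_one_iff.mp h1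
      have hkeys : d.keys = [kv.1] := by
        show d.items.map Prod.fst = [kv.1]
        rw [hkv]
        rfl
      rw [hkeys]
      have hc : (PySem.Dict.mk [(kv.1, (0 : Int))]).contains kv.1 = true := by
        rw [PySem.Dict.contains_eq_decide_mem_keys]
        simp [PySem.Dict.keys]
      show ((PySem.Dict.mk [(kv.1, (0 : Int))]).insert ([kv.1].headD "") 1).items =
        ([kv.1].foldl (fun L ch => L.insert ch (1 : Int)) PySem.Dict.empty).items
    -- both sides are the one-entry dict [(kv.1, 1)]
      simp only [List.headD_cons, List.foldl_cons, List.foldl_nil]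
      rw [show ((PySem.Dict.mk [(kv.1, (0 : Int))]).insert kv.1 1).items =
          List.map (fun p => if (p.1 == kv.1) = true then (kv.1, (1 : Int)) else p)
            (PySem.Dict.mk [(kv.1, (0 : Int))]).items from
        PySem.Dict.items_insert_of_contains _ _ hc]
      simp [PySem.Dict.empty, PySem.Dict.insert]
    · rw [if_neg (by simp [h1]), if_neg (by simp [h1])]
      have hge2 : 1 < d.items.length := by
        have := List.length_pos_iff.mpr hdne
        omega
      -- A side: run the count-dict simulation against the ghost loop
      have hsim := pvLoop_sim d.keys hk d.items.length gH (fun _ => 0) hINVH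
      beta_reduce at hsim
      have hzero : ∀ c, hufSumD gH c = 0 := by
        intro c
        rw [pvSumD_perm hpermH c, hg0]
        exact pvInitSum d.items c
      have e0 : PySem.Dict.mk (d.keys.map fun c => (c, (0 : Int))) =
          PySem.Dict.mk (d.keys.map fun c => (c, (0 : Int) + hufSumD gH c)) := by
        congr 1
        apply List.map_congr_left
        intro c _
        simp [hzero c]
      rw [e0, hsim]
      -- B side: the array loop tracks the ghost loop
      rw [hmapB, pvASize, List.length_map, hlenH]
      rw [pvBLoop d.keys d.items.length gH hINVH]
      obtain ⟨iF, i1F, i2F⟩ := pvLoopB_spec d.keys d.items.length gH hINVH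
      have hlenF : (hufLoopB d.items.length gH).length = 1 := by
        have a1 := i1F (by omega)
        have a2 := i2F (by omega)
        omega
      obtain ⟨e, he⟩ := List.length_eq_one_iff.mp hlenF
      rw [he] at iF ⊢
      obtain ⟨f1, f2, f3⟩ := iF
      have hleaves_nodup : (hufLeaves e.2.2).Nodup := by simpa using f1
      have hmemk : ∀ c, c ∈ hufLeaves e.2.2 ↔ c ∈ d.keys := by
        intro c
        have := f2 c
        simpa using this
      -- B's root is the ghost root's tree
      have hroot : (Array.mk ([e].map hufTr)).getD 0 bhDflt = e.2.2 := by
        rw [pvAGetD]; rfl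
      rw [hroot, pvBhWalk_single]
      have hfinB : (d.keys.foldl (fun L ch =>
            L.insert ch ((hufWalk e.2.2 0 PySem.Dict.empty).getD ch 0))
            PySem.Dict.empty).items =
          d.keys.map fun c => (c, (hufWalk e.2.2 0 PySem.Dict.empty).getD c 0) := by
        rw [PySem.Dict.items_foldl_insert_fresh d.keys (fun c => c)
          (fun ch => (hufWalk e.2.2 0 PySem.Dict.empty).getD ch 0)
          PySem.Dict.empty (fun a _ => by simp) (by simpa using hk)]
        simp [PySem.Dict.empty]
      rw [hfinB]
      show (PySem.Dict.mk (d.keys.map fun c => (c, (0 : Int) + hufSumD [e] c))).items = _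
      show (d.keys.map fun c => (c, (0 : Int) + hufSumD [e] c)) = _
      apply List.map_congr_left
      intro c hc
      have hval : (hufWalk e.2.2 0 PySem.Dict.empty).getD c 0 = hufDepthIn e.2.2 c := by
        rw [PySem.Dict.getD_eq_get?_getD, pvWalk_get? e.2.2 0 _ c hleaves_nodup,
          if_pos ((hmemk c).mpr hc)]
        simp
      rw [hval]
      simp [hufSumD]
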